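-- pv_equiv track=rewrite | github.com/alanlindsay100/mast_xaip_toolkit | xaip_tools/user_io/nl2action.py | check_rules_match
-- ===== SOURCE A (Python) =====
-- def check_rules_match(s_lst, rules):
--   rel_rs = [r for r in (map(lambda x: x.split(" "), rules)) if r[0] in s_lst]
--   for rule in rel_rs:
--     rule = tuple(rule)
--     rule_len = len(rule)
--     for i in range(len(s_lst) - rule_len + 1):
--       if tuple(s_lst[i:i + rule_len]) == rule:
--         return True
--   return False
-- ===== SOURCE B (Python) =====
-- def check_rules_match(s_lst, rules):
--   # One pass builds an index token -> positions; each rule is then checked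
--   # only at the candidate offsets where its first token actually occurs.
--   index = {}
--   for i, t in enumerate(s_lst):
--     index.setdefault(t, []).append(i)
--   for r in rules:
--     tokens = r.split(" ")
--     k = len(tokens)
--     for start in index.get(tokens[0], []):
--       if s_lst[start:start + k] == tokens:
--         return True
--   return False
-- ===== Notes on version B (the rewrite author's own statement) =====
-- stated objective: faster
-- what changed: B builds a token->positions index of s_lst in one pass and checks each rule only at the candidate offsets where its first token occurs, instead of A's filter pass plus a full scan of every start offset per rule.
import Mathlib
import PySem

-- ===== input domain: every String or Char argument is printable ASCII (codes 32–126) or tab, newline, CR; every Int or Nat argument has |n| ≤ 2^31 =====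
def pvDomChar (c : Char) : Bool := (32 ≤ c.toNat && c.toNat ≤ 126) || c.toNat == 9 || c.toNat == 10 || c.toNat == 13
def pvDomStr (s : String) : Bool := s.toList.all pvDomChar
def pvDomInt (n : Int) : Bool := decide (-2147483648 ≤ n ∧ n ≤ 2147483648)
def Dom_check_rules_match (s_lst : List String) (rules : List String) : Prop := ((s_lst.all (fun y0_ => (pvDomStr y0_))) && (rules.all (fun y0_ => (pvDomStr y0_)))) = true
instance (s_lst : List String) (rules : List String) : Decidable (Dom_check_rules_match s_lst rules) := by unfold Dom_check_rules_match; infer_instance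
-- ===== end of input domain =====

-- B builds a one-pass token→positions index and tests each rule only at the
-- candidate offsets of its first token, instead of scanning every offset per rule.


-- ===== PORT A =====
-- r.split(" ") is always nonempty, so r[0] never raises; ported as pyGetD r 0 "".
def check_rules_match (s_lst : List String) (rules : List String) : Bool :=
  let rel_rs := (rules.map (fun x => (PySem.Str.split? x " ").getD [])).filter
    (fun r => s_lst.contains (PySem.List.pyGetD r 0 ""))
  rel_rs.any (fun rule =>
    let rule_len : Int := rule.length
    (PySem.List.pyRange 0 ((s_lst.length : Int) - rule_len + 1) 1).any (fun i =>
      PySem.List.slice s_lst (some i) (some (i + rule_len)) == rule))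

-- ===== PORT B =====
-- index = {}; for i, t in enumerate(s_lst): index.setdefault(t, []).append(i)
-- then each rule is tried only at index.get(tokens[0], []).
def check_rules_match_alt (s_lst : List String) (rules : List String) : Bool :=
  let index : PySem.Dict String (List Int) :=
    (PySem.List.enumerate s_lst 0).foldl
      (fun d p => d.modify p.2 [] (fun l => l ++ [p.1])) PySem.Dict.empty
  rules.any (fun r =>
    let tokens := (PySem.Str.split? r " ").getD []
    let k : Int := tokens.length
    (index.getD (PySem.List.pyGetD tokens 0 "") []).any (fun start =>
      PySem.List.slice s_lst (some start) (some (start + k)) == tokens))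

-- ===== PRECONDITION & SPEC =====
def Spec_check_rules_match (s_lst : List String) (rules : List String) (out : Bool) : Prop := out = check_rules_match_alt s_lst rules
instance (s_lst : List String) (rules : List String) (out : Bool) : Decidable (Spec_check_rules_match s_lst rules out) := by unfold Spec_check_rules_match; infer_instance

-- ===== CLAIM (what is proved, stated in full; the proofs are below) =====
def Claim_equal_check_rules_match : Prop := ∀ (s_lst : List String) (rules : List String), Dom_check_rules_match s_lst rules → Spec_check_rules_match s_lst rules (check_rules_match s_lst rules)

-- ===== LEMMAS AND PROOFS =====

-- B's index lookup is exactly the list of positions of h in s_lst.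
theorem index_getD (s_lst : List String) (h : String) :
    (((PySem.List.enumerate s_lst 0).foldl
        (fun d p => d.modify p.2 [] (fun l => l ++ [p.1])) PySem.Dict.empty).getD h [])
      = ((PySem.List.enumerate s_lst 0).filter (fun p => p.2 == h)).map (·.1) := by
  have hmap : (PySem.List.enumerate s_lst 0).foldl
      (fun d p => d.modify p.2 [] (fun l => l ++ [p.1])) PySem.Dict.empty
      = ((PySem.List.enumerate s_lst 0).map (fun p => (p.2, p.1))).foldl
        (fun d p => d.modify p.1 [] (fun l => l ++ [p.2])) PySem.Dict.empty := by
    rw [List.foldl_map]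
  rw [hmap, PySem.Dict.getD_foldl_modify_append]
  simp [List.filter_map, List.map_map, Function.comp_def]

-- Per-rule core: A's first-token membership test plus its full offset scan agrees
-- with B's scan over only the positions of the first token.
theorem per_rule (s_lst ts : List String) :
    (s_lst.contains (PySem.List.pyGetD ts 0 "") &&
      (PySem.List.pyRange 0 ((s_lst.length : Int) - (ts.length : Int) + 1) 1).any (fun i =>
        PySem.List.slice s_lst (some i) (some (i + (ts.length : Int))) == ts))
    = (PySem.List.enumerate s_lst 0).any (fun p =>
        (p.2 == PySem.List.pyGetD ts 0 "") &&
        (PySem.List.slice s_lst (some p.1) (some (p.1 + (ts.length : Int))) == ts)) := by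
  rw [Bool.eq_iff_iff]
  simp only [Bool.and_eq_true, List.any_eq_true,
    PySem.List.mem_pyRange_one, PySem.List.mem_enumerate_iff,
    List.contains_eq_mem, decide_eq_true_eq, beq_iff_eq]
  constructor
  · rintro ⟨hmem, i, ⟨hi0, hiub⟩, hsl⟩
    obtain ⟨j, hj⟩ : ∃ j : Nat, (j : Int) = i := ⟨i.toNat, Int.toNat_of_nonneg hi0⟩
    subst hj
    rw [PySem.List.slice_natCast_add] at hsl
    rcases ts with _ | ⟨t0, trest⟩
    · -- empty rule: h = "", take 0 = []; pick any position of "" from hmem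
      obtain ⟨j', hj', hget⟩ := List.mem_iff_getElem.mp hmem
      refine ⟨⟨0 + (j' : Int), s_lst[j']⟩, ⟨j', hj', rfl⟩, hget, ?_⟩
      simp only
      rw [show ((0:Int) + (j':Int)) = ((j':Nat):Int) by ring, PySem.List.slice_natCast_add]
      simp
    · -- nonempty rule: s_lst[j] is the first token
      have hjn : j < s_lst.length := by
        by_contra hge
        rw [List.drop_eq_nil_of_le (by omega)] at hsl
        simp at hsl
      have hhead : s_lst[j] = t0 := by
        have h0 : ((s_lst.drop j).take (t0 :: trest).length)[0]? = some t0 := by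
          rw [hsl]; rfl
        rw [List.getElem?_take_of_lt (by simp), List.getElem?_drop,
          List.getElem?_eq_getElem (by omega)] at h0
        simpa using Option.some.inj h0
      refine ⟨⟨0 + (j : Int), s_lst[j]⟩, ⟨j, hjn, rfl⟩, by simpa using hhead, ?_⟩
      simp only
      rw [show ((0:Int) + (j:Int)) = ((j:Nat):Int) by ring, PySem.List.slice_natCast_add]
      exact hsl
  · rintro ⟨a, ⟨j, hj, rfl⟩, hkh, hsl⟩
    simp only at hkh hsl ⊢
    rw [show ((0:Int) + (j:Int)) = ((j:Nat):Int) by ring] at hsl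
    rw [PySem.List.slice_natCast_add] at hsl
    have hlen : j + ts.length ≤ s_lst.length := by
      have h := congrArg List.length hsl
      simp [List.length_take, List.length_drop] at h
      omega
    constructor
    · rw [← hkh]; exact List.getElem_mem hj
    · refine ⟨(j : Int), ⟨by positivity, ?_⟩, ?_⟩
      · omega
      · rw [PySem.List.slice_natCast_add]; exact hsl

-- ===== VERDICT (by name: the statement is the Claim_ definition above) =====
theorem check_rules_match_spec : Claim_equal_check_rules_match := by
  intro s_lst rules _
  unfold Spec_check_rules_match check_rules_match check_rules_match_alt
  simp only [index_getD, List.any_filter, List.any_map, Function.comp_def]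
  exact congrArg (List.any rules) (funext fun r => per_rule s_lst ((PySem.Str.split? r " ").getD []))
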